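-- pv_equiv track=rewrite | github.com/Demothedread/lawyerfactory | legal_research_integration.py | _extract_legal_keywords
-- ===== SOURCE A (Python) =====
-- from typing import Dict, List, Optional, Any, Tuple, Union
--
-- def _extract_legal_keywords(fact_context: List[str]) -> List[str]:
--     """Extract legal keywords from fact context"""
--     keywords = set()
--     legal_terms = [
--         'contract', 'breach', 'negligent', 'duty', 'care', 'damages',
--         'fraud', 'misrepresentation', 'defamation', 'liability',
--         'intentional', 'reckless', 'causation', 'proximate'
--     ]
--
--     for fact in fact_context:
--         fact_lower = fact.lower()
--         for term in legal_terms: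
--             if term in fact_lower:
--                 keywords.add(term)
--
--     return list(keywords)
-- ===== SOURCE B (Python) =====
-- def _extract_legal_keywords(fact_context):
--     """Extract legal keywords from fact context."""
--     legal_terms = [
--         'contract', 'breach', 'negligent', 'duty', 'care', 'damages',
--         'fraud', 'misrepresentation', 'defamation', 'liability',
--         'intentional', 'reckless', 'causation', 'proximate'
--     ]
--     found = []
--     remaining = legal_terms
--     for fact in fact_context:
--         if not remaining:
--             break
--         fact_lower = fact.lower()
--         found += [term for term in remaining if term in fact_lower]
--         remaining = [term for term in remaining if term not in fact_lower]
--     return found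
-- ===== Notes on version B (the rewrite author's own statement) =====
-- stated objective: alternative
-- what changed: Replaces the set accumulated inside a nested per-fact/per-term scan by a shrinking worklist: each fact partitions the remaining unseen terms into found and still-remaining, and the loop exits early once every term has been found; no set is maintained (A returns list(set), whose iteration order is hash order, so outputs are compared as sets).
import Mathlib
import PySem

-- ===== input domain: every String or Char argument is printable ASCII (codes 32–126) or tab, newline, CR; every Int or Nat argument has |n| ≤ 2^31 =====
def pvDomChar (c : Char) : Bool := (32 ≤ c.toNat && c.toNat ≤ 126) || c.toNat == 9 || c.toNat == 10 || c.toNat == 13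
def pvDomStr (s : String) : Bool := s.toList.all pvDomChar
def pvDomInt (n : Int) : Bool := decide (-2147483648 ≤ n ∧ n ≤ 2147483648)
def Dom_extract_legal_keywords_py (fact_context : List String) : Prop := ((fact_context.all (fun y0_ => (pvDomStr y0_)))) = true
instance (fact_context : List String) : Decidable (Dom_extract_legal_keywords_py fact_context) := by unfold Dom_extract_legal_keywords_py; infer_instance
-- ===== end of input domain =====

-- B replaces A's set accumulated inside a nested scan by a shrinking worklist of terms not
-- yet found, with an early exit once every term is found (objective: alternative, no speed claim).
-- Python A returns list(set) (hash iteration order); outputs are compared as sets, and both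
-- ports return the deterministic discovery-order list (the set's insertion order).

-- the `legal_terms` table, identical in both Pythons
def pvLegalTerms : List String :=
  ["contract", "breach", "negligent", "duty", "care", "damages",
   "fraud", "misrepresentation", "defamation", "liability",
   "intentional", "reckless", "causation", "proximate"]

-- ===== PORT A =====
def extract_legal_keywords_py (fact_context : List String) : List String :=
  fact_context.foldl
    (fun keywords fact =>
      let fact_lower := PySem.Str.lower fact
      pvLegalTerms.foldl
        (fun kw term => if PySem.Str.isIn term fact_lower then PySem.Set.add kw term else kw)
        keywords)
    PySem.Set.empty

-- ===== PORT B =====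
-- the `for fact in fact_context:` loop over state (found, remaining), `break` when remaining is empty
def pvBLoop : List String → List String → List String → List String
  | [], found, _ => found
  | fact :: rest, found, remaining =>
    if remaining.isEmpty then found
    else
      let fact_lower := PySem.Str.lower fact
      pvBLoop rest
        (found ++ remaining.filter (fun term => PySem.Str.isIn term fact_lower))
        (remaining.filter (fun term => !(PySem.Str.isIn term fact_lower)))

def extract_legal_keywords_py_alt (fact_context : List String) : List String :=
  pvBLoop fact_context [] pvLegalTerms

-- ===== PRECONDITION & SPEC =====
def Spec_extract_legal_keywords_py (fact_context : List String) (out : List String) : Prop := out = extract_legal_keywords_py_alt fact_context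
instance (fact_context : List String) (out : List String) : Decidable (Spec_extract_legal_keywords_py fact_context out) := by unfold Spec_extract_legal_keywords_py; infer_instance

-- ===== CLAIM (what is proved, stated in full; the proofs are below) =====
def Claim_equal_extract_legal_keywords_py : Prop := ∀ (fact_context : List String), Dom_extract_legal_keywords_py fact_context → Spec_extract_legal_keywords_py fact_context (extract_legal_keywords_py fact_context)

-- ===== LEMMAS AND PROOFS =====

lemma pvLegalTerms_nodup : pvLegalTerms.Nodup := by decide

-- A's inner fold over the term table starting from set s appends the new hits in table order
lemma pvInnerFold (q : String → Bool) (ts : List String) (hnd : ts.Nodup) (s : List String) :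
    ts.foldl (fun kw term => if q term then PySem.Set.add kw term else kw) s
      = s ++ ts.filter (fun term => q term && !(PySem.Set.contains s term)) := by
  induction ts generalizing s with
  | nil => simp
  | cons t ts ih =>
    have hnt : t ∉ ts := (List.nodup_cons.mp hnd).1
    have hnd' : ts.Nodup := (List.nodup_cons.mp hnd).2
    simp only [List.foldl_cons, List.filter_cons]
    by_cases hq : q t
    · by_cases hc : PySem.Set.contains s t = true
      · have hts : t ∈ s := (PySem.Set.contains_iff s t).mp hc
        have hadd : PySem.Set.add s t = s := by simp [PySem.Set.add, hts]
        rw [if_pos hq, hadd, ih hnd' s]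
        simp [hq, hts]
      · have hts : t ∉ s := fun hm => hc ((PySem.Set.contains_iff s t).mpr hm)
        have hadd : PySem.Set.add s t = s ++ [t] := by simp [PySem.Set.add, hts]
        rw [if_pos hq, hadd, ih hnd' (s ++ [t])]
        have hfil : ts.filter (fun x => q x && !(PySem.Set.contains (s ++ [t]) x))
            = ts.filter (fun x => q x && !(PySem.Set.contains s x)) := by
          apply List.filter_congr
          intro x hx
          have hxt : x ≠ t := fun h => hnt (h ▸ hx)
          have hcc : PySem.Set.contains (s ++ [t]) x = PySem.Set.contains s x := by
            cases hsx : PySem.Set.contains s x with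
            | true =>
              have : x ∈ s := (PySem.Set.contains_iff s x).mp hsx
              exact (PySem.Set.contains_iff _ x).mpr (by simp [this])
            | false =>
              have hns : x ∉ s := fun hm => by
                rw [(PySem.Set.contains_iff s x).mpr hm] at hsx; cases hsx
              cases hsx2 : PySem.Set.contains (s ++ [t]) x with
              | true =>
                have : x ∈ s ++ [t] := (PySem.Set.contains_iff _ x).mp hsx2
                simp [hns, hxt] at this
              | false => rfl
          rw [hcc]
        rw [hfil]
        simp [hq, hts]
    · rw [if_neg hq, ih hnd' s]
      simp [hq]

-- once every term is in the set, A's outer fold is the identity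
lemma pvAFold_saturated (fs s : List String)
    (h : ∀ t ∈ pvLegalTerms, PySem.Set.contains s t = true) :
    fs.foldl
      (fun keywords fact =>
        let fact_lower := PySem.Str.lower fact
        pvLegalTerms.foldl
          (fun kw term => if PySem.Str.isIn term fact_lower then PySem.Set.add kw term else kw)
          keywords) s = s := by
  induction fs with
  | nil => rfl
  | cons f fs ih =>
    rw [List.foldl_cons]
    show fs.foldl _ (pvLegalTerms.foldl _ s) = s
    rw [pvInnerFold _ _ pvLegalTerms_nodup s]
    have hfil : pvLegalTerms.filter
        (fun term => PySem.Str.isIn term (PySem.Str.lower f) && !(PySem.Set.contains s term)) = [] := by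
      apply List.filter_eq_nil_iff.mpr
      intro t ht hp
      rw [Bool.and_eq_true, h t ht] at hp
      exact absurd hp.2 (by decide)
    rw [hfil, List.append_nil, ih]

-- the loop invariant: A's fold from set s equals B's loop with found = s and
-- remaining = the table terms not yet in s
lemma pvLoopInv (fs s : List String) :
    fs.foldl
      (fun keywords fact =>
        let fact_lower := PySem.Str.lower fact
        pvLegalTerms.foldl
          (fun kw term => if PySem.Str.isIn term fact_lower then PySem.Set.add kw term else kw)
          keywords) s
    = pvBLoop fs s (pvLegalTerms.filter (fun t => !(PySem.Set.contains s t))) := by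
  induction fs generalizing s with
  | nil => rfl
  | cons f fs ih =>
    rw [List.foldl_cons]
    show fs.foldl _ (pvLegalTerms.foldl _ s) = pvBLoop (f :: fs) s _
    rw [pvInnerFold _ _ pvLegalTerms_nodup s]
    by_cases hemp : (pvLegalTerms.filter (fun t => !(PySem.Set.contains s t))).isEmpty = true
    · have hall : ∀ t ∈ pvLegalTerms, PySem.Set.contains s t = true := by
        intro t ht
        cases hcc : PySem.Set.contains s t with
        | true => rfl
        | false =>
          have hmem : t ∈ pvLegalTerms.filter (fun t => !(PySem.Set.contains s t)) :=
            List.mem_filter.mpr ⟨ht, by rw [hcc]; rfl⟩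
          rw [List.isEmpty_iff.mp hemp] at hmem
          cases hmem
      have hfil : pvLegalTerms.filter
          (fun term => PySem.Str.isIn term (PySem.Str.lower f) && !(PySem.Set.contains s term)) = [] := by
        apply List.filter_eq_nil_iff.mpr
        intro t ht hp
        rw [Bool.and_eq_true, hall t ht] at hp
        exact absurd hp.2 (by decide)
      rw [hfil, List.append_nil, pvAFold_saturated fs s hall]
      show s = pvBLoop (f :: fs) s _
      simp only [pvBLoop]
      rw [if_pos hemp]
    · have hstep : pvBLoop (f :: fs) s (pvLegalTerms.filter (fun t => !(PySem.Set.contains s t)))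
          = pvBLoop fs
              (s ++ (pvLegalTerms.filter (fun t => !(PySem.Set.contains s t))).filter
                (fun term => PySem.Str.isIn term (PySem.Str.lower f)))
              ((pvLegalTerms.filter (fun t => !(PySem.Set.contains s t))).filter
                (fun term => !(PySem.Str.isIn term (PySem.Str.lower f)))) := by
        simp only [pvBLoop]
        rw [if_neg hemp]
      rw [hstep]
      set s' := s ++ pvLegalTerms.filter
        (fun term => PySem.Str.isIn term (PySem.Str.lower f) && !(PySem.Set.contains s term)) with hs'
      have hfound : s ++ (pvLegalTerms.filter (fun t => !(PySem.Set.contains s t))).filter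
          (fun term => PySem.Str.isIn term (PySem.Str.lower f)) = s' := by
        rw [List.filter_filter, hs']
      have hmem : ∀ t ∈ pvLegalTerms,
          PySem.Set.contains s' t = (PySem.Set.contains s t || PySem.Str.isIn t (PySem.Str.lower f)) := by
        intro t ht
        cases hc : PySem.Set.contains s t with
        | true =>
          rw [Bool.true_or]
          have hts : t ∈ s := (PySem.Set.contains_iff s t).mp hc
          exact (PySem.Set.contains_iff s' t).mpr (by rw [hs']; exact List.mem_append_left _ hts)
        | false =>
          have hns : t ∉ s := fun hm => by
            rw [(PySem.Set.contains_iff s t).mpr hm] at hc; cases hc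
          cases hin : PySem.Str.isIn t (PySem.Str.lower f) with
          | true =>
            rw [Bool.false_or]
            refine (PySem.Set.contains_iff s' t).mpr ?_
            rw [hs']
            refine List.mem_append_right _ (List.mem_filter.mpr ⟨ht, ?_⟩)
            show (PySem.Str.isIn t (PySem.Str.lower f) && !(PySem.Set.contains s t)) = true
            rw [hin, hc]
            rfl
          | false =>
            rw [Bool.false_or]
            have hns' : t ∉ s' := by
              rw [hs']
              intro hm
              rcases List.mem_append.mp hm with h1 | h1
              · exact hns h1
              · have h2 := (List.mem_filter.mp h1).2
                rw [Bool.and_eq_true, hin] at h2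
                exact absurd h2.1 (by decide)
            cases h2 : PySem.Set.contains s' t with
            | true => exact absurd ((PySem.Set.contains_iff s' t).mp h2) hns'
            | false => rfl
      have hrem : (pvLegalTerms.filter (fun t => !(PySem.Set.contains s t))).filter
          (fun term => !(PySem.Str.isIn term (PySem.Str.lower f)))
          = pvLegalTerms.filter (fun t => !(PySem.Set.contains s' t)) := by
        rw [List.filter_filter]
        apply List.filter_congr
        intro t ht
        show (!(PySem.Str.isIn t (PySem.Str.lower f)) && !(PySem.Set.contains s t))
            = !(PySem.Set.contains s' t)
        rw [hmem t ht]
        cases hc : PySem.Set.contains s t <;>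
          cases hin : PySem.Str.isIn t (PySem.Str.lower f) <;> rfl
      rw [hfound, hrem]
      exact ih s'

-- ===== VERDICT (by name: the statement is the Claim_ definition above) =====
theorem extract_legal_keywords_py_spec : Claim_equal_extract_legal_keywords_py := by
  intro fc _
  unfold Spec_extract_legal_keywords_py extract_legal_keywords_py extract_legal_keywords_py_alt
  have h0 : pvLegalTerms.filter (fun t => !(PySem.Set.contains ([] : List String) t))
      = pvLegalTerms := by decide
  rw [show (PySem.Set.empty : List String) = [] from rfl, pvLoopInv fc [], h0]
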